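-- pv_equiv track=rewrite | github.com/supersj/phylogenetic_tree_upgma | Needleman.py | creatIndexgap
-- ===== SOURCE A (Python) =====
-- def creatIndexgap(sequence):
--     index = {}
--     i = 0
--     sum = 0
--     for ele in sequence:
--         if ele == '-':
--             sum+=1
--         if ele != '-':
--             index[i] = sum
--             i+=1
--             sum = 0
--     index[i] = sum
--     return index
-- ===== SOURCE B (Python) =====
-- def creatIndexgap(sequence):
--     positions = []
--     total = 0
--     for ele in sequence:
--         if ele != '-':
--             positions.append(total)
--         total += 1
--     index = {}
--     prev = -1
--     for j, p in enumerate(positions):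
--         index[j] = p - prev - 1
--         prev = p
--     index[len(positions)] = total - 1 - prev
--     return index
-- ===== Notes on version B (the rewrite author's own statement) =====
-- stated objective: alternative
-- what changed: B computes gap counts as differences between consecutive non-gap positions collected in a first pass (plus a trailing entry), instead of A's single pass with a resetting gap counter.
import Mathlib
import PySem

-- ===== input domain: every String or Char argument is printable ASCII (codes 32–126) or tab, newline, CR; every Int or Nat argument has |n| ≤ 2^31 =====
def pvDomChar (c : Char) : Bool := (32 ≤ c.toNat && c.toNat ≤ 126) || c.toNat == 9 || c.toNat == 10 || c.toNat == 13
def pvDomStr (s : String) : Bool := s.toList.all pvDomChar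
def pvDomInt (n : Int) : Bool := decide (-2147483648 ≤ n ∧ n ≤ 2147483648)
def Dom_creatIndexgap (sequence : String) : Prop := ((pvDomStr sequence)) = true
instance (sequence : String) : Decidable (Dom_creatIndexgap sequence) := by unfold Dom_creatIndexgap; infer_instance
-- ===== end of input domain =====

-- B derives each gap count from the distance between consecutive non-gap positions
-- (two passes: collect positions, then difference them) instead of A's resetting
-- running counter; objective: alternative decomposition, same cost.


-- ===== PORT A =====
-- loop body of A: update the running gap counter, emit and reset at a non-gap
def stepA (st : PySem.Dict Int Int × Int × Int) (ele : Char) : PySem.Dict Int Int × Int × Int :=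
  let sum := if ele = '-' then st.2.2 + 1 else st.2.2
  if ele ≠ '-' then (st.1.insert st.2.1 sum, st.2.1 + 1, 0) else (st.1, st.2.1, sum)

def creatIndexgap (sequence : String) : List (Int × Int) :=
  let st := sequence.toList.foldl stepA (PySem.Dict.empty, 0, 0)
  (st.1.insert st.2.1 st.2.2).items

-- ===== PORT B =====
-- pass 1 of B: collect positions of non-gap elements while counting all elements
def stepB1 (st : List Int × Int) (ele : Char) : List Int × Int :=
  (if ele ≠ '-' then st.1 ++ [st.2] else st.1, st.2 + 1)

-- pass 2 of B: difference consecutive non-gap positions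
def stepB2 (st : PySem.Dict Int Int × Int) (pr : Int × Int) : PySem.Dict Int Int × Int :=
  (st.1.insert pr.1 (pr.2 - st.2 - 1), pr.2)

def creatIndexgap_alt (sequence : String) : List (Int × Int) :=
  let p := sequence.toList.foldl stepB1 ([], 0)
  let st2 := (PySem.List.enumerate p.1).foldl stepB2 (PySem.Dict.empty, -1)
  (st2.1.insert (p.1.length : Int) (p.2 - 1 - st2.2)).items

-- ===== PRECONDITION & SPEC =====
def Spec_creatIndexgap (sequence : String) (out : List (Int × Int)) : Prop := out = creatIndexgap_alt sequence
instance (sequence : String) (out : List (Int × Int)) : Decidable (Spec_creatIndexgap sequence out) := by unfold Spec_creatIndexgap; infer_instance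

-- ===== CLAIM (what is proved, stated in full; the proofs are below) =====
def Claim_equal_creatIndexgap : Prop := ∀ (sequence : String), Dom_creatIndexgap sequence → Spec_creatIndexgap sequence (creatIndexgap sequence)

-- ===== LEMMAS AND PROOFS =====

/-- Positions (absolute indices, starting from offset `t`) of the non-gap characters. -/
def posList : List Char → Int → List Int
  | [], _ => []
  | c :: cs, t => if c = '-' then posList cs (t + 1) else t :: posList cs (t + 1)

/-- Common description of the result: entries (j, gap run before the j-th non-gap),
    plus the trailing entry for gaps after the last non-gap. -/
def specG : List Int → Int → Int → Int → List (Int × Int)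
  | [], j, prev, tEnd => [(j, tEnd - 1 - prev)]
  | p :: ps, j, prev, tEnd => (j, p - prev - 1) :: specG ps (j + 1) p tEnd

lemma not_contains_of_keys_lt (d : PySem.Dict Int Int) (i : Int)
    (hk : ∀ k ∈ d.keys, k < i) : d.contains i = false := by
  rw [PySem.Dict.contains_eq_decide_mem_keys]
  simp only [decide_eq_false_iff_not]
  intro h; exact absurd (hk i h) (lt_irrefl i)

lemma stepA_gap (st : PySem.Dict Int Int × Int × Int) :
    stepA st '-' = (st.1, st.2.1, st.2.2 + 1) := by simp [stepA]

lemma stepA_ngap {c : Char} (hc : c ≠ '-') (st : PySem.Dict Int Int × Int × Int) :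
    stepA st c = (st.1.insert st.2.1 st.2.2, st.2.1 + 1, 0) := by simp [stepA, hc]

lemma stepB1_gap (st : List Int × Int) : stepB1 st '-' = (st.1, st.2 + 1) := by simp [stepB1]

lemma stepB1_ngap {c : Char} (hc : c ≠ '-') (st : List Int × Int) :
    stepB1 st c = (st.1 ++ [st.2], st.2 + 1) := by simp [stepB1, hc]

lemma A_fold (cs : List Char) : ∀ (d : PySem.Dict Int Int) (i prev t0 s : Int),
    s = t0 - prev - 1 → (∀ k ∈ d.keys, k < i) →
    ((cs.foldl stepA (d, i, s)).1.insert (cs.foldl stepA (d, i, s)).2.1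
        (cs.foldl stepA (d, i, s)).2.2).items
      = d.items ++ specG (posList cs t0) i prev (t0 + cs.length) := by
  induction cs with
  | nil =>
    intro d i prev t0 s hs hk
    subst hs
    simp only [List.foldl_nil, List.length_nil, Nat.cast_zero, add_zero, posList, specG]
    rw [PySem.Dict.items_insert_of_not_contains d _ (not_contains_of_keys_lt d i hk)]
    have : t0 - prev - 1 = t0 - 1 - prev := by ring
    rw [this]
  | cons c cs ih =>
    intro d i prev t0 s hs hk
    by_cases hc : c = '-'
    · subst hc
      rw [List.foldl_cons, stepA_gap]
      rw [ih d i prev (t0 + 1) (s + 1) (by omega) hk]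
      rw [show posList ('-' :: cs) t0 = posList cs (t0 + 1) by simp [posList]]
      rw [show t0 + (('-' :: cs).length : Int) = (t0 + 1) + (cs.length : Int) by simp only [List.length_cons]; push_cast; ring]
    · rw [List.foldl_cons, stepA_ngap hc]
      rw [ih (d.insert i s) (i + 1) t0 (t0 + 1) 0 (by omega)
        (by intro k hkm
            rcases (PySem.Dict.mem_keys_insert d i k s).1 hkm with h | h
            · omega
            · have := hk k h; omega)]
      rw [PySem.Dict.items_insert_of_not_contains d _ (not_contains_of_keys_lt d i hk)]
      rw [show posList (c :: cs) t0 = t0 :: posList cs (t0 + 1) by simp [posList, hc]]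
      rw [show specG (t0 :: posList cs (t0 + 1)) i prev (t0 + ((c :: cs).length : Int))
            = (i, t0 - prev - 1) :: specG (posList cs (t0 + 1)) (i + 1) t0
                (t0 + ((c :: cs).length : Int)) from rfl]
      rw [show t0 + ((c :: cs).length : Int) = (t0 + 1) + (cs.length : Int) by simp only [List.length_cons]; push_cast; ring]
      subst hs
      simp

lemma B_fold1 (cs : List Char) : ∀ (ps : List Int) (t : Int),
    cs.foldl stepB1 (ps, t) = (ps ++ posList cs t, t + cs.length) := by
  induction cs with
  | nil => intro ps t; simp [posList]
  | cons c cs ih =>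
    intro ps t
    by_cases hc : c = '-'
    · subst hc
      rw [List.foldl_cons, stepB1_gap, ih]
      simp only [posList, Prod.ext_iff, List.length_cons]
      constructor
      · rfl
      · push_cast; ring
    · rw [List.foldl_cons, stepB1_ngap hc, ih]
      simp only [posList, if_neg hc, Prod.ext_iff, List.length_cons]
      constructor
      · simp
      · push_cast; ring

lemma B_fold2 (ps : List Int) : ∀ (j prev tEnd : Int) (d : PySem.Dict Int Int),
    (∀ k ∈ d.keys, k < j) →
    (((PySem.List.enumerate ps j).foldl stepB2 (d, prev)).1.insert (j + ps.length)
        (tEnd - 1 - ((PySem.List.enumerate ps j).foldl stepB2 (d, prev)).2)).items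
      = d.items ++ specG ps j prev tEnd := by
  induction ps with
  | nil =>
    intro j prev tEnd d hk
    simp only [PySem.List.enumerate_nil, List.foldl_nil, List.length_nil, Nat.cast_zero,
      add_zero, specG]
    rw [PySem.Dict.items_insert_of_not_contains d _ (not_contains_of_keys_lt d j hk)]
  | cons p ps ih =>
    intro j prev tEnd d hk
    rw [PySem.List.enumerate_cons, List.foldl_cons,
      show stepB2 (d, prev) (j, p) = (d.insert j (p - prev - 1), p) from rfl]
    rw [show j + ((p :: ps).length : Int) = (j + 1) + (ps.length : Int) by simp only [List.length_cons]; push_cast; ring]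
    rw [ih (j + 1) p tEnd (d.insert j (p - prev - 1))
      (by intro k hkm
          rcases (PySem.Dict.mem_keys_insert d j k _).1 hkm with h | h
          · omega
          · have := hk k h; omega)]
    rw [PySem.Dict.items_insert_of_not_contains d _ (not_contains_of_keys_lt d j hk)]
    simp [specG]

-- ===== VERDICT (by name: the statement is the Claim_ definition above) =====
theorem creatIndexgap_spec : Claim_equal_creatIndexgap := by
  intro s _
  unfold Spec_creatIndexgap creatIndexgap creatIndexgap_alt
  have hp : s.toList.foldl stepB1 ([], 0) = (posList s.toList 0, (s.toList.length : Int)) := by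
    rw [B_fold1]; simp
  simp only [hp]
  rw [A_fold s.toList PySem.Dict.empty 0 (-1) 0 0 (by ring)
    (by simp [PySem.Dict.keys_empty])]
  rw [show ((posList s.toList 0).length : Int) = 0 + ((posList s.toList 0).length : Int) by ring]
  rw [B_fold2 (posList s.toList 0) 0 (-1) (s.toList.length : Int) PySem.Dict.empty
    (by simp [PySem.Dict.keys_empty])]
  norm_num
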